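-- pv_equiv track=rewrite | github.com/ClawBio/ClawBio | skills/dnasp/dnasp.py | _count_derived
-- ===== SOURCE A (Python) =====
-- _GAP_CHARS = frozenset("-?N")
--
-- def _count_derived(seqs: list[str], outgroup: str) -> tuple[int, int]:
--     """Count outgroup-polarised derived mutations.
--
--     Applies complete deletion: any column with a gap in any ingroup sequence OR
--     in the outgroup is skipped.
--
--     Parameters
--     ----------
--     seqs : list[str]
--         Ingroup sequences (all same length, already uppercase).
--     outgroup : str
--         Outgroup sequence (same length as seqs).
--
--     Returns
--     -------
--     eta : int
--         Total number of derived mutations across all polarisable sites.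
--     eta_e : int
--         Derived mutations carried by exactly one ingroup sequence (external).
--     """
--     if not seqs:
--         return 0, 0
--     L = len(seqs[0])
--     if len(outgroup) < L:
--         raise ValueError(
--             f"Outgroup length ({len(outgroup)}) shorter than alignment ({L})."
--         )
--     eta = 0
--     eta_e = 0
--     for pos in range(L):
--         anc = outgroup[pos]
--         if anc in _GAP_CHARS:
--             continue
--         col = [s[pos] for s in seqs]
--         if any(c in _GAP_CHARS for c in col):
--             continue
--         states = frozenset(col)
--         if anc not in states or len(states) < 2:
--             continue  # monomorphic or ancestral allele absent
--         for derived in states - {anc}: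
--             n_carriers = sum(1 for c in col if c == derived)
--             eta += 1
--             if n_carriers == 1:
--                 eta_e += 1
--     return eta, eta_e
-- ===== SOURCE B (Python) =====
-- def _count_derived(seqs: list[str], outgroup: str) -> tuple[int, int]:
--     """Sort-then-run-scan rewrite: each column is sorted so equal alleles are
--     contiguous; one run-length scan yields the number of distinct states, the
--     singleton states and whether the ancestral allele occurs, and eta is the
--     closed form (runs - 1) instead of a per-allele loop."""
--     if not seqs:
--         return 0, 0
--     L = len(seqs[0])
--     if len(outgroup) < L:
--         raise ValueError(
--             f"Outgroup length ({len(outgroup)}) shorter than alignment ({L})."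
--         )
--     eta = 0
--     eta_e = 0
--     for pos in range(L):
--         anc = outgroup[pos]
--         if anc in "-?N":
--             continue
--         col = sorted(s[pos] for s in seqs)
--         n = len(col)
--         runs = 0        # number of distinct states in the column
--         singles = 0     # non-ancestral states carried by exactly one sequence
--         anc_seen = False
--         gap = False
--         i = 0
--         while i < n:
--             j = i + 1
--             while j < n and col[j] == col[i]:
--                 j += 1
--             c = col[i]
--             if c in "-?N":
--                 gap = True
--                 break
--             runs += 1
--             if c == anc:
--                 anc_seen = True
--             elif j - i == 1:
--                 singles += 1
--             i = j
--         if gap or not anc_seen or runs < 2: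
--             continue
--         eta += runs - 1    # every state other than anc is one derived mutation
--         eta_e += singles
--     return eta, eta_e
-- ===== Notes on version B (the rewrite author's own statement) =====
-- stated objective: alternative
-- what changed: Each column is sorted so equal alleles become contiguous and a single run-length scan yields the number of distinct states, the singleton non-ancestral states and ancestral presence, with eta obtained as the closed form (runs - 1) instead of A's frozenset of states plus a per-derived-allele rescan of the column.
import Mathlib
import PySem

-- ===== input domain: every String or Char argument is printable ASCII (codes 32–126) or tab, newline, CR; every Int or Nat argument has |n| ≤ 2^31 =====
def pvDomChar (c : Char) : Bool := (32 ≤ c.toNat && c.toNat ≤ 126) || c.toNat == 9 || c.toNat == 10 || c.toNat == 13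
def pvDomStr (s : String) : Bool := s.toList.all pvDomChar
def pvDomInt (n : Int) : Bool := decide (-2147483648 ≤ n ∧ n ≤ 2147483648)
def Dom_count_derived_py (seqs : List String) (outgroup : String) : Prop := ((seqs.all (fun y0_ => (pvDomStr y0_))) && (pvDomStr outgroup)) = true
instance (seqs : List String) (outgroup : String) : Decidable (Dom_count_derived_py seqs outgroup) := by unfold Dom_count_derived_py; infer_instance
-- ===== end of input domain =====

-- B sorts each column and counts allele runs in one scan, taking eta as the closed form
-- (distinct states - 1), instead of A's frozenset of states + per-derived-allele rescan of
-- the column; return values are identical.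

-- _GAP_CHARS = frozenset("-?N")  (shared module constant)
def pvGaps : PySem.Set Char := PySem.Set.ofList ['-', '?', 'N']

-- ===== PORT A =====
def count_derived_py (seqs : List String) (outgroup : String) : Int × Int :=
  match seqs with
  | [] => (0, 0)
  | s0 :: _ =>
    let L : Nat := s0.toList.length
    if outgroup.toList.length < L then (0, 0)  -- Python raises ValueError here; Pre_ excludes it
    else
      (PySem.List.pyRange 0 (L : Int)).foldl (fun st pos =>
        let anc : Char := (PySem.Str.pyGet? outgroup pos).getD ' '
        if PySem.Set.contains pvGaps anc then st
        else
          -- col = [s[pos] for s in seqs]; an out-of-range s[pos] is IndexError, excluded by Pre_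
          let col : List Char := seqs.map (fun s => (PySem.Str.pyGet? s pos).getD ' ')
          if col.any (fun c => PySem.Set.contains pvGaps c) then st
          else
            let states : PySem.Set Char := PySem.Set.ofList col
            if PySem.Set.contains states anc = false ∨ PySem.Set.len states < 2 then st
            else
              (PySem.Set.diff states [anc]).foldl (fun st2 derived =>
                let n : Int := col.foldl (fun acc c => if c == derived then acc + 1 else acc) 0
                (st2.1 + 1, if n = 1 then st2.2 + 1 else st2.2)) st
      ) (0, 0)

-- ===== PORT B =====
-- c in "-?N"
def pvIsGap (c : Char) : Bool := c == '-' || c == '?' || c == 'N'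

-- the while loop of Source B over the sorted column: each call handles one run of equal
-- characters (the inner `while col[j] == col[i]` is the takeWhile/dropWhile split) and
-- threads the runs/singles/anc_seen accumulators; none = the loop set `gap` and broke.
def pvRunScan (anc : Char) (runs singles : Int) (seen : Bool) :
    List Char → Option (Int × Int × Bool)
  | [] => some (runs, singles, seen)
  | c :: rest =>
    if pvIsGap c then none
    else
      let run := rest.takeWhile (fun x => x == c)
      let rest' := rest.dropWhile (fun x => x == c)
      pvRunScan anc (runs + 1)
        (if c == anc then singles
         else if run.length == 0 then singles + 1 else singles)
        (seen || c == anc) rest'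
termination_by l => l.length
decreasing_by exact Nat.lt_succ_of_le (List.length_dropWhile_le _ _)

def count_derived_py_alt (seqs : List String) (outgroup : String) : Int × Int :=
  match seqs with
  | [] => (0, 0)
  | s0 :: _ =>
    let L : Nat := s0.toList.length
    if outgroup.toList.length < L then (0, 0)  -- same ValueError; Pre_ excludes it
    else
      (PySem.List.pyRange 0 (L : Int)).foldl (fun st pos =>
        let anc : Char := (PySem.Str.pyGet? outgroup pos).getD ' '
        if pvIsGap anc then st
        else
          -- col = sorted(s[pos] for s in seqs); an out-of-range s[pos] is IndexError, excluded by Pre_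
          let col : List Char :=
            PySem.List.sorted (seqs.map (fun s => (PySem.Str.pyGet? s pos).getD ' '))
              (fun c => c) false
          match pvRunScan anc 0 0 false col with
          | none => st  -- gap: continue
          | some (runs, singles, seen) =>
            if seen = false ∨ runs < 2 then st
            else (st.1 + (runs - 1), st.2 + singles)
      ) (0, 0)

-- ===== PRECONDITION & SPEC =====
-- Pre_ excludes exactly the inputs where A raises: a non-empty alignment whose outgroup is
-- shorter than seqs[0] (ValueError), or with some column pos not masked by an outgroup gap
-- in which some ingroup sequence has no character (IndexError).
def Pre_count_derived_py (seqs : List String) (outgroup : String) : Prop :=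
  seqs = [] ∨
  ((seqs.headD "").toList.length ≤ outgroup.toList.length ∧
   ∀ pos < (seqs.headD "").toList.length,
     outgroup.toList.getD pos ' ' ∈ (['-', '?', 'N'] : List Char) ∨
     ∀ s ∈ seqs, pos < s.toList.length)
instance (seqs : List String) (outgroup : String) : Decidable (Pre_count_derived_py seqs outgroup) := by
  unfold Pre_count_derived_py; infer_instance

def pvWitness_count_derived_py : List String × String := (["ACA", "ATA"], "AAT")

def Spec_count_derived_py (seqs : List String) (outgroup : String) (out : Int × Int) : Prop := out = count_derived_py_alt seqs outgroup
instance (seqs : List String) (outgroup : String) (out : Int × Int) : Decidable (Spec_count_derived_py seqs outgroup out) := by unfold Spec_count_derived_py; infer_instance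

-- ===== CLAIM (what is proved, stated in full; the proofs are below) =====
def Claim_equal_count_derived_py : Prop := ∀ (seqs : List String) (outgroup : String), Dom_count_derived_py seqs outgroup → Pre_count_derived_py seqs outgroup → Spec_count_derived_py seqs outgroup (count_derived_py seqs outgroup)

-- ===== LEMMAS AND PROOFS =====

lemma pvRunScan_cons (anc : Char) (runs singles : Int) (seen : Bool) (c : Char)
    (rest : List Char) (hg : pvIsGap c = false) :
    pvRunScan anc runs singles seen (c :: rest) =
      pvRunScan anc (runs + 1)
        (if c == anc then singles
         else if (rest.takeWhile (fun x => x == c)).length == 0 then singles + 1 else singles)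
        (seen || c == anc) (rest.dropWhile (fun x => x == c)) := by
  rw [pvRunScan]; simp [hg]

lemma pvRunScan_spec (anc : Char) (runs singles : Int) (seen : Bool) (l : List Char) :
    l.Pairwise (· ≤ ·) →
    pvRunScan anc runs singles seen l =
      if l.any pvIsGap then none
      else some (runs + (l.toFinset.card : Int),
                 singles + ((l.toFinset.filter (fun c => c ≠ anc ∧ l.count c = 1)).card : Int),
                 seen || l.contains anc) := by
  induction runs, singles, seen, l using pvRunScan.induct (anc := anc) with
  | case1 runs singles seen =>
    intro _; simp [pvRunScan]
  | case2 runs singles seen c rest hg =>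
    intro _; rw [pvRunScan]; simp [hg]
  | case3 runs singles seen c rest hg run rest' ih =>
    intro hs
    rw [List.pairwise_cons] at hs
    obtain ⟨hle, hrest⟩ := hs
    have hg' : pvIsGap c = false := by simpa using hg
    have hrun : run = rest.takeWhile (fun x => x == c) := rfl
    have hrest' : rest' = rest.dropWhile (fun x => x == c) := rfl
    simp only [dite_eq_ite] at ih
    have hsub : rest'.Sublist rest := List.dropWhile_sublist _
    have hsplit : run ++ rest' = rest := List.takeWhile_append_dropWhile
    have hrunc : ∀ x ∈ run, x = c := fun x hx => by
      have := List.mem_takeWhile_imp hx; simpa using this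
    have hsorted' : rest'.Pairwise (· ≤ ·) := hrest.sublist hsub
    have hcmem : c ∉ rest' := by
      intro hmem
      rcases hd : rest' with _ | ⟨d, t⟩
      · rw [hd] at hmem; simp at hmem
      · have hdne : (d == c) = false := by
          have := List.head?_dropWhile_not (fun x => x == c) rest
          rw [← hrest', hd] at this; simpa using this
        have hdnec : d ≠ c := by simpa using hdne
        have hdmem : d ∈ rest := hsub.subset (by rw [hd]; simp)
        have hcd : c < d := lt_of_le_of_ne (hle _ hdmem) (Ne.symm hdnec)
        rw [hd] at hmem
        rcases List.mem_cons.mp hmem with h | h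
        · exact hdnec h.symm
        · have : d ≤ c := by
            rw [hd] at hsorted'
            exact (List.pairwise_cons.mp hsorted').1 _ h
          exact absurd (lt_of_lt_of_le hcd this) (lt_irrefl c)
    -- run scan step + IH
    rw [pvRunScan_cons anc runs singles seen c rest hg', ← hrun, ← hrest', ih hsorted']
    -- bridge facts
    have hany : (c :: rest).any pvIsGap = rest'.any pvIsGap := by
      rw [List.any_cons, hg', ← hsplit, List.any_append]
      have : run.any pvIsGap = false := by
        rw [List.any_eq_false]
        intro x hx; rw [hrunc x hx]; simp [hg']
      rw [this]; simp
    have hfin : (c :: rest).toFinset = insert c rest'.toFinset := by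
      ext x
      simp only [List.toFinset_cons, Finset.mem_insert, List.mem_toFinset, ← hsplit,
        List.mem_append]
      constructor
      · rintro (h | h | h)
        · exact Or.inl h
        · exact Or.inl (hrunc x h)
        · exact Or.inr h
      · rintro (h | h)
        · exact Or.inl h
        · exact Or.inr (Or.inr h)
    have hcfin : c ∉ rest'.toFinset := by simpa using hcmem
    have hcard : (c :: rest).toFinset.card = rest'.toFinset.card + 1 := by
      rw [hfin, Finset.card_insert_of_notMem hcfin]
    have hcount_run : run.count c = run.length :=
      List.count_eq_length.mpr (fun b hb => (hrunc b hb).symm)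
    have hcount_c : (c :: rest).count c = run.length + 1 := by
      rw [List.count_cons_self, ← hsplit, List.count_append, hcount_run,
        List.count_eq_zero.mpr hcmem]
    have hcount_ne : ∀ x, x ≠ c → (c :: rest).count x = rest'.count x := by
      intro x hx
      have h0 : run.count x = 0 := List.count_eq_zero.mpr (fun hm => hx (hrunc x hm))
      rw [List.count_cons, ← hsplit, List.count_append, h0]
      simp [Ne.symm hx]
    have hcontains : (c :: rest).contains anc = ((c == anc) || rest'.contains anc) := by
      rw [List.contains_eq_mem, List.contains_eq_mem, Bool.eq_iff_iff]
      simp only [Bool.or_eq_true, decide_eq_true_eq, beq_iff_eq, List.mem_cons, ← hsplit,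
        List.mem_append]
      constructor
      · rintro (h | h | h)
        · exact Or.inl h.symm
        · exact Or.inl (hrunc anc h).symm
        · exact Or.inr h
      · rintro (h | h)
        · exact Or.inl h.symm
        · exact Or.inr (Or.inr h)
    have hfilter : (c :: rest).toFinset.filter (fun x => x ≠ anc ∧ (c :: rest).count x = 1)
        = (if c ≠ anc ∧ run.length = 0
           then insert c (rest'.toFinset.filter (fun x => x ≠ anc ∧ rest'.count x = 1))
           else rest'.toFinset.filter (fun x => x ≠ anc ∧ rest'.count x = 1)) := by
      rw [hfin, Finset.filter_insert]
      have hq : rest'.toFinset.filter (fun x => x ≠ anc ∧ (c :: rest).count x = 1)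
          = rest'.toFinset.filter (fun x => x ≠ anc ∧ rest'.count x = 1) := by
        apply Finset.filter_congr
        intro x hx
        have hxc : x ≠ c := fun h => hcfin (h ▸ hx)
        rw [hcount_ne x hxc]
      rw [hq]
      by_cases hpc : c ≠ anc ∧ run.length = 0
      · rw [if_pos, if_pos hpc]
        exact ⟨hpc.1, by rw [hcount_c, hpc.2]⟩
      · rw [if_neg, if_neg hpc]
        intro ⟨h1, h2⟩
        exact hpc ⟨h1, by rw [hcount_c] at h2; omega⟩
    rw [hany]
    by_cases hgany : rest'.any pvIsGap = true
    · rw [if_pos hgany, if_pos hgany]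
    · rw [if_neg hgany, if_neg hgany]
      have hnotmemfilter : c ∉ rest'.toFinset.filter (fun x => x ≠ anc ∧ rest'.count x = 1) :=
        fun h => hcfin (Finset.mem_filter.mp h).1
      have h1 : runs + 1 + (rest'.toFinset.card : Int) = runs + ((c :: rest).toFinset.card : Int) := by
        rw [hcard]; push_cast; ring
      have h3 : ((seen || (c == anc)) || rest'.contains anc) = (seen || (c :: rest).contains anc) := by
        rw [hcontains, Bool.or_assoc]
      have h2 : (if (c == anc) = true then singles
                 else if (run.length == 0) = true then singles + 1 else singles)
          + ((rest'.toFinset.filter (fun x => x ≠ anc ∧ rest'.count x = 1)).card : Int)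
          = singles + (((c :: rest).toFinset.filter
              (fun x => x ≠ anc ∧ (c :: rest).count x = 1)).card : Int) := by
        rw [hfilter]
        by_cases hca : c = anc
        · have : ¬ (c ≠ anc ∧ run.length = 0) := fun h => h.1 hca
          rw [if_neg this]
          simp [hca]
        · have hbeq : (c == anc) = false := by simp [hca]
          by_cases hrl : run.length = 0
          · have hpos : c ≠ anc ∧ run.length = 0 := ⟨hca, hrl⟩
            rw [if_pos hpos, Finset.card_insert_of_notMem hnotmemfilter, hbeq]
            simp only [hrl, Bool.false_eq_true, if_false, beq_self_eq_true, if_true]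
            push_cast
            ring
          · have hneg : ¬ (c ≠ anc ∧ run.length = 0) := fun h => hrl h.2
            have hleq : (run.length == 0) = false := by simpa using hrl
            rw [if_neg hneg, hbeq, hleq]
            simp
      simp only [Option.some.injEq, Prod.mk.injEq]
      exact ⟨h1, h2, h3⟩

lemma pv_gap_eq (c : Char) : PySem.Set.contains pvGaps c = pvIsGap c := by
  have h : pvGaps = ['-', '?', 'N'] := rfl
  rw [PySem.Set.contains_eq_listContains, h, pvIsGap, Bool.eq_iff_iff]
  simp
  tauto

lemma pv_col_eq (colA : List Char) (st : Int × Int) (anc : Char) :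
    (if PySem.Set.contains pvGaps anc then st
     else if colA.any (fun c => PySem.Set.contains pvGaps c) then st
     else if PySem.Set.contains (PySem.Set.ofList colA) anc = false ∨
             PySem.Set.len (PySem.Set.ofList colA) < 2 then st
     else (PySem.Set.diff (PySem.Set.ofList colA) [anc]).foldl (fun st2 derived =>
            let n : Int := colA.foldl (fun acc c => if c == derived then acc + 1 else acc) 0
            (st2.1 + 1, if n = 1 then st2.2 + 1 else st2.2)) st)
  = (if pvIsGap anc then st
     else
       match pvRunScan anc 0 0 false (PySem.List.sorted colA (fun c => c) false) with
       | none => st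
       | some (runs, singles, seen) =>
         if seen = false ∨ runs < 2 then st
         else (st.1 + (runs - 1), st.2 + singles)) := by
  rw [pv_gap_eq]
  cases hanc : pvIsGap anc with
  | true => simp
  | false =>
    simp only [Bool.false_eq_true, if_false]
    have hperm : (PySem.List.sorted colA (fun c => c) false).Perm colA :=
      PySem.List.sorted_perm colA (fun c => c) false
    have hpw : (PySem.List.sorted colA (fun c => c) false).Pairwise (· ≤ ·) :=
      PySem.List.sorted_pairwise colA (fun c => c)
    rw [pvRunScan_spec anc 0 0 false _ hpw]
    set l := PySem.List.sorted colA (fun c => c) false with hl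
    have hany : colA.any (fun c => PySem.Set.contains pvGaps c) = l.any pvIsGap := by
      rw [PySem.List.any_congr_mem (g := pvIsGap) (fun x _ => pv_gap_eq x)]
      exact hperm.any_eq.symm
    rw [hany]
    cases hga : l.any pvIsGap with
    | true => simp
    | false =>
      simp only [Bool.false_eq_true, if_false]
      -- shared abbreviations
      have hmemS : ∀ x, PySem.Set.contains (PySem.Set.ofList colA) x = decide (x ∈ colA) := by
        intro x
        rw [PySem.Set.contains_eq_listContains]
        rw [List.contains_eq_mem x (PySem.Set.ofList colA)]
        rw [decide_eq_decide]
        exact PySem.Set.mem_ofList colA x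
      have hnd : (PySem.Set.ofList colA : List Char).Nodup := PySem.Set.nodup_ofList colA
      have hSfin : (PySem.Set.ofList colA : List Char).toFinset = colA.toFinset := by
        ext x; simp [List.mem_toFinset, PySem.Set.mem_ofList]
      have hSlen : PySem.Set.len (PySem.Set.ofList colA) = (colA.toFinset.card : Int) := by
        show ((PySem.Set.ofList colA : List Char).length : Int) = _
        rw [← List.toFinset_card_of_nodup hnd, hSfin]
      have hlfin : l.toFinset = colA.toFinset := List.toFinset_eq_of_perm _ _ hperm
      have hlcontains : l.contains anc = decide (anc ∈ colA) := by
        rw [List.contains_eq_mem anc l, decide_eq_decide]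
        exact hperm.mem_iff
      have hlcount : ∀ x, l.count x = colA.count x := fun x => hperm.count_eq x
      have hguard : ((false || l.contains anc) = false ∨ (0:Int) + (l.toFinset.card : Int) < 2)
          ↔ ((PySem.Set.ofList colA).contains anc = false ∨ (PySem.Set.ofList colA).len < 2) := by
        rw [hmemS anc, hlcontains, hSlen, hlfin]
        simp
      by_cases hg2 : (PySem.Set.ofList colA).contains anc = false ∨ (PySem.Set.ofList colA).len < 2
      · rw [if_pos hg2, if_pos (hguard.mpr hg2)]
      · rw [if_neg hg2, if_neg (fun h => hg2 (hguard.mp h))]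
        push Not at hg2
        obtain ⟨hc1, hc2⟩ := hg2
        have hancmem : anc ∈ colA := by
          rw [hmemS anc] at hc1
          simpa using hc1
        have hcard1 : 1 ≤ colA.toFinset.card :=
          Finset.card_pos.mpr ⟨anc, List.mem_toFinset.mpr hancmem⟩
        set D := (PySem.Set.ofList colA).diff [anc] with hD
        have hDfil : D = (PySem.Set.ofList colA : List Char).filter
            (fun x => !(List.contains [anc] x)) := rfl
        have hDnd : D.Nodup := by rw [hDfil]; exact hnd.filter _
        have hDfin : D.toFinset = colA.toFinset.filter (fun x => x ≠ anc) := by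
          rw [hDfil, List.toFinset_filter, hSfin]
          apply Finset.filter_congr
          intro x _
          simp
        have hDlen1 : D.length + 1 = colA.toFinset.card := by
          rw [← List.toFinset_card_of_nodup hDnd, hDfin, Finset.filter_ne',
            Finset.card_erase_of_mem (List.mem_toFinset.mpr hancmem)]
          omega
        have hDcount : D.countP (fun d => decide ((colA.count d : Int) = 1))
            = (colA.toFinset.filter (fun c => c ≠ anc ∧ colA.count c = 1)).card := by
          rw [List.countP_eq_length_filter]
          have hnd2 : (D.filter (fun d => decide ((colA.count d : Int) = 1))).Nodup :=
            hDnd.filter _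
          rw [← List.toFinset_card_of_nodup hnd2, List.toFinset_filter, hDfin,
            Finset.filter_filter]
          congr 1
          apply Finset.filter_congr
          intro x _
          simp only [decide_eq_true_eq]
          constructor
          · rintro ⟨h1, h2⟩
            exact ⟨h1, by exact_mod_cast h2⟩
          · rintro ⟨h1, h2⟩
            exact ⟨h1, by exact_mod_cast h2⟩
        have hscard : ({c ∈ l.toFinset | c ≠ anc ∧ List.count c l = 1} : Finset Char).card
            = (colA.toFinset.filter (fun c => c ≠ anc ∧ colA.count c = 1)).card := by
          rw [hlfin]
          congr 1
          apply Finset.filter_congr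
          intro x _
          rw [hlcount x]
        -- evaluate A's fold
        have hbody : ∀ (st2 : Int × Int), ∀ d ∈ D,
            ((fun st2 derived =>
              ((st2 : Int × Int).1 + 1,
                if List.foldl (fun acc c => if (c == derived) = true then acc + 1 else acc) (0:Int) colA = 1
                then st2.2 + 1 else st2.2)) st2 d)
            = (st2.1 + 1, if ((colA.count d : Int) = 1) then st2.2 + 1 else st2.2) := by
          intro st2 d _
          beta_reduce
          rw [PySem.List.foldl_beq_add_one colA d 0]
          norm_num
        rw [PySem.List.foldl_congr_mem D
          (fun st2 derived =>
            (st2.1 + 1,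
              if List.foldl (fun acc c => if (c == derived) = true then acc + 1 else acc) (0:Int) colA = 1
              then st2.2 + 1 else st2.2))
          (fun st2 d => (st2.1 + 1, if ((colA.count d : Int) = 1) then st2.2 + 1 else st2.2))
          st hbody]
        rw [PySem.List.foldl_prod_mk (f := fun a (_ : Char) => a + (1:Int))
          (g := fun b (d : Char) => if ((colA.count d : Int) = 1) then b + 1 else b)]
        rw [PySem.List.foldl_add D (fun _ => (1:Int)) st.1, PySem.List.sum_map_const_int,
          PySem.List.foldl_ite_add_one (p := fun d => ((colA.count d : Int) = 1)) D st.2]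
        rw [hDcount, hscard, hlfin]
        have hc2' : 2 ≤ colA.toFinset.card := by
          rw [hSlen] at hc2; exact_mod_cast hc2
        have hlen : (D.length : Int) = (colA.toFinset.card : Int) - 1 := by
          omega
        rw [hlen]
        refine Prod.ext_iff.mpr ⟨?_, ?_⟩ <;> (show _ = _; ring)

-- ===== VERDICT (by name: the statement is the Claim_ definition above) =====
theorem count_derived_py_spec : Claim_equal_count_derived_py := by
  intro seqs outgroup _ _
  unfold Spec_count_derived_py
  cases seqs with
  | nil => rfl
  | cons s0 rest =>
    simp only [count_derived_py, count_derived_py_alt]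
    by_cases hlen : outgroup.toList.length < s0.toList.length
    · rw [if_pos hlen, if_pos hlen]
    · rw [if_neg hlen, if_neg hlen]
      apply PySem.List.foldl_congr_mem
      intro st pos _
      exact pv_col_eq ((s0 :: rest).map (fun s => (PySem.Str.pyGet? s pos).getD ' ')) st
        ((PySem.Str.pyGet? outgroup pos).getD ' ')
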